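-- pv_equiv track=rewrite | github.com/maliksaad1/Enigmatix_Internship | Test/19.py | fight_game
-- ===== SOURCE A (Python) =====
-- def fight_game(sentence):
--     left_score = sum(4 if char == 'w' else 3 if char == 'p' else 2 if char == 'b' else 1 if char == 's' else 0 for char in sentence)
--     right_score = sum(4 if char == 'm' else 3 if char == 'q' else 2 if char == 'd' else 1 if char == 'z' else 0 for char in sentence)
--
--     if left_score > right_score:
--         return "Left side wins!"
--     elif right_score > left_score:
--         return "Right side wins!"
--     else:
--         return "Let's fight again!"
-- ===== SOURCE B (Python) =====
-- def fight_game(sentence):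
--     freq = {}
--     for ch in sentence:
--         freq[ch] = freq.get(ch, 0) + 1
--     net = 0
--     for ch, w in (('w', 4), ('p', 3), ('b', 2), ('s', 1),
--                   ('m', -4), ('q', -3), ('d', -2), ('z', -1)):
--         net += w * freq.get(ch, 0)
--     if net > 0:
--         return "Left side wins!"
--     if net < 0:
--         return "Right side wins!"
--     return "Let's fight again!"
-- ===== Notes on version B (the rewrite author's own statement) =====
-- stated objective: alternative
-- what changed: Replaces A's per-character scoring (two full passes, each with a four-way conditional per character) by a histogram: one pass builds a character-frequency dict, then the net score is a weighted sum of the eight relevant letter counts, and the winner is read off the sign of the net.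
import Mathlib
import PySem

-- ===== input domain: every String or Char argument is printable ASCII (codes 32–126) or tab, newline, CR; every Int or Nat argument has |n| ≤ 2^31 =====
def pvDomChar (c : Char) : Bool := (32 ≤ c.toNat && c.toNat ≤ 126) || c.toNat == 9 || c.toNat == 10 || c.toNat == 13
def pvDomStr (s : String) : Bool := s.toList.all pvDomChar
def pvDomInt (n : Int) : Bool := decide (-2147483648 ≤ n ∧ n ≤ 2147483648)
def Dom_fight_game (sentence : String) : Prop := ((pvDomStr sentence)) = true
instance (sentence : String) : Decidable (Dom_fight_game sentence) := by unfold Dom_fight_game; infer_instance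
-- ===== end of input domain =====

-- B replaces A's two per-character scoring passes by a character histogram plus a
-- weighted sum over the eight scoring letters; objective: alternative.

-- ===== PORT A =====
-- per-char left score of A's first generator expression
def pvLeftW (c : Char) : Int :=
  if c = 'w' then 4 else if c = 'p' then 3 else if c = 'b' then 2 else if c = 's' then 1 else 0

-- per-char right score of A's second generator expression
def pvRightW (c : Char) : Int :=
  if c = 'm' then 4 else if c = 'q' then 3 else if c = 'd' then 2 else if c = 'z' then 1 else 0

def fight_game (sentence : String) : String :=
  let left_score := sentence.toList.foldl (fun acc c => acc + pvLeftW c) 0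
  let right_score := sentence.toList.foldl (fun acc c => acc + pvRightW c) 0
  if left_score > right_score then "Left side wins!"
  else if right_score > left_score then "Right side wins!"
  else "Let's fight again!"

-- ===== PORT B =====
-- B's literal weight tuple (('w',4), …)
def pvWeightPairs : List (Char × Int) :=
  [('w', 4), ('p', 3), ('b', 2), ('s', 1), ('m', -4), ('q', -3), ('d', -2), ('z', -1)]

def fight_game_alt (sentence : String) : String :=
  -- freq[ch] = freq.get(ch, 0) + 1 over the sentence
  let freq := sentence.toList.foldl
    (fun (d : PySem.Dict Char Int) ch => d.insert ch (d.getD ch 0 + 1)) PySem.Dict.empty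
  -- net += w * freq.get(ch, 0) over the weight tuple
  let net := pvWeightPairs.foldl (fun acc p => acc + p.2 * freq.getD p.1 0) 0
  if net > 0 then "Left side wins!"
  else if net < 0 then "Right side wins!"
  else "Let's fight again!"

-- ===== PRECONDITION & SPEC =====
def Spec_fight_game (sentence : String) (out : String) : Prop := out = fight_game_alt sentence
instance (sentence : String) (out : String) : Decidable (Spec_fight_game sentence out) := by unfold Spec_fight_game; infer_instance

-- ===== CLAIM =====
def Claim_equal_fight_game : Prop := ∀ (sentence : String), Dom_fight_game sentence → Spec_fight_game sentence (fight_game sentence)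

-- ===== LEMMAS AND PROOFS =====
-- A's left pass is a weighted sum of letter counts
theorem pvLeft_foldl (l : List Char) (a : Int) :
    List.foldl (fun acc c => acc + pvLeftW c) a l
      = a + 4 * (l.count 'w' : Int) + 3 * (l.count 'p' : Int)
          + 2 * (l.count 'b' : Int) + (l.count 's' : Int) := by
  induction l generalizing a with
  | nil => simp
  | cons c l ih =>
    simp only [List.foldl_cons, ih, List.count_cons]
    unfold pvLeftW
    split_ifs <;> simp_all <;> omega

-- A's right pass is a weighted sum of letter counts
theorem pvRight_foldl (l : List Char) (a : Int) :
    List.foldl (fun acc c => acc + pvRightW c) a l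
      = a + 4 * (l.count 'm' : Int) + 3 * (l.count 'q' : Int)
          + 2 * (l.count 'd' : Int) + (l.count 'z' : Int) := by
  induction l generalizing a with
  | nil => simp
  | cons c l ih =>
    simp only [List.foldl_cons, ih, List.count_cons]
    unfold pvRightW
    split_ifs <;> simp_all <;> omega

-- B's histogram lookup is the letter count
theorem pvFreq_getD (l : List Char) (v : Char) :
    (l.foldl (fun (d : PySem.Dict Char Int) ch => d.insert ch (d.getD ch 0 + 1))
        PySem.Dict.empty).getD v 0 = (l.count v : Int) := by
  rw [PySem.Dict.getD_foldl_insert_add_one]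
  simp

-- ===== VERDICT =====
theorem fight_game_spec : Claim_equal_fight_game := by
  intro s _
  unfold Spec_fight_game fight_game fight_game_alt
  simp only [pvWeightPairs, List.foldl_cons, List.foldl_nil, pvFreq_getD,
    pvLeft_foldl, pvRight_foldl]
  split_ifs <;> first | rfl | omega
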